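-- pv_equiv track=rewrite | github.com/SnowballHQ/data_enricher | data-enrichment-system/app/file_processor.py | _find_required_columns_case_b
-- ===== SOURCE A (Python) =====
-- from typing import Dict, List, Optional, Tuple
--
-- def _find_required_columns_case_b(columns: List[str]) -> Dict[str, Optional[str]]:
--     """Find required columns for Case B processing"""
--     columns_lower = [col.lower().strip() for col in columns]
--     result = {
--         'website': None,
--         'company_name': None
--     }
--
--     for i, col in enumerate(columns_lower):
--         if ('website' in col or 'url' in col or 'web' in col) and not result['website']:
--             result['website'] = columns[i]
--         elif ('company' in col or 'name' in col or 'business' in col) and not result['company_name']: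
--             result['company_name'] = columns[i]
--
--     return result
-- ===== SOURCE B (Python) =====
-- from typing import Dict, List, Optional
--
--
-- def _find_required_columns_case_b(columns: List[str]) -> Dict[str, Optional[str]]:
--     """Find required columns for Case B processing"""
--     def first_idx(keys, skip=None):
--         return next(
--             (i for i, col in enumerate(columns)
--              if i != skip and any(k in col.lower().strip() for k in keys)),
--             None)
--
--     w = first_idx(('website', 'url', 'web'))
--     c = first_idx(('company', 'name', 'business'), skip=w)
--     return {
--         'website': None if w is None else columns[w],
--         'company_name': None if c is None else columns[c],
--     }
-- ===== Notes on version B (the rewrite author's own statement) =====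
-- stated objective: alternative
-- what changed: Replaces the single stateful loop with elif/truthiness bookkeeping by two independent first-match searches: a helper returns the first index whose lowercased-stripped column contains any keyword (the company search skipping exactly the website's index), and the dict is built from the two lookups.
import Mathlib
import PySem

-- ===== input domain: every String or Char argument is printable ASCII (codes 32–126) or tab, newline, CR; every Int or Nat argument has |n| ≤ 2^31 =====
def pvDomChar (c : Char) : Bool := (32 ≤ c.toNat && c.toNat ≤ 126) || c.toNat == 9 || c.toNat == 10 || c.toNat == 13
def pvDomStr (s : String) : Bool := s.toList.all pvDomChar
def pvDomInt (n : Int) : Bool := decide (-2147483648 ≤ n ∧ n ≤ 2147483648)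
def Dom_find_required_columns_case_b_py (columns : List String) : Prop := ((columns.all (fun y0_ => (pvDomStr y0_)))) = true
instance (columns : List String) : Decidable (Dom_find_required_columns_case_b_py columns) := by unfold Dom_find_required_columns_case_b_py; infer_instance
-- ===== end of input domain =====

-- B replaces A's single stateful elif-loop by two independent first-match index searches
-- (the company search skipping the website's index); same results, stated as exact equivalence.

-- ===== PORT A =====
-- col.lower().strip()
def pvLow (s : String) : String := PySem.Str.strip (PySem.Str.lower s)

-- Python truthiness of an Optional[str] slot ('not result[...]' is true for None and '')
def pvTruthy (o : Option String) : Bool :=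
  match o with
  | none => false
  | some s => decide (0 < PySem.Str.len s)

def find_required_columns_case_b_py (columns : List String) : List (String × Option String) :=
  let columns_lower := columns.map (fun col => pvLow col)
  let r := (PySem.List.enumerate columns_lower).foldl
    (fun (r : Option String × Option String) (ic : Int × String) =>
      if (PySem.Str.isIn "website" ic.2 || PySem.Str.isIn "url" ic.2 || PySem.Str.isIn "web" ic.2)
          && !(pvTruthy r.1) then
        -- result['website'] = columns[i]; i comes from enumerate, so always in range
        (PySem.List.pyGet? columns ic.1, r.2)
      else if (PySem.Str.isIn "company" ic.2 || PySem.Str.isIn "name" ic.2 || PySem.Str.isIn "business" ic.2)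
          && !(pvTruthy r.2) then
        (r.1, PySem.List.pyGet? columns ic.1)
      else r)
    (none, none)
  [("website", r.1), ("company_name", r.2)]

-- ===== PORT B =====
-- any(k in col.lower().strip() for k in keys)
def pvMatches (keys : List String) (c : String) : Bool :=
  keys.any (fun k => PySem.Str.isIn k (PySem.Str.strip (PySem.Str.lower c)))

-- first_idx: first i with i != skip whose column matches any keyword
def pvFirstIdx (pairs : List (Int × String)) (keys : List String) (skip : Option Int) : Option Int :=
  match pairs with
  | [] => none
  | (i, c) :: rest =>
      if (some i != skip) && pvMatches keys c then some i else pvFirstIdx rest keys skip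

def find_required_columns_case_b_py_alt (columns : List String) : List (String × Option String) :=
  let w := pvFirstIdx (PySem.List.enumerate columns) ["website", "url", "web"] none
  let c := pvFirstIdx (PySem.List.enumerate columns) ["company", "name", "business"] w
  -- 'None if w is None else columns[w]'; a found index is always in range
  [("website", w.bind (fun i => PySem.List.pyGet? columns i)),
   ("company_name", c.bind (fun i => PySem.List.pyGet? columns i))]

-- ===== PRECONDITION & SPEC =====
def Spec_find_required_columns_case_b_py (columns : List String) (out : List (String × Option String)) : Prop := out = find_required_columns_case_b_py_alt columns
instance (columns : List String) (out : List (String × Option String)) : Decidable (Spec_find_required_columns_case_b_py columns out) := by unfold Spec_find_required_columns_case_b_py; infer_instance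

-- ===== CLAIM (what is proved, stated in full; the proofs are below) =====
def Claim_equal_find_required_columns_case_b_py : Prop := ∀ (columns : List String), Dom_find_required_columns_case_b_py columns → Spec_find_required_columns_case_b_py columns (find_required_columns_case_b_py columns)

-- ===== LEMMAS AND PROOFS =====

-- abbreviations for the two match conditions (on the ORIGINAL column)
def webB (c : String) : Bool :=
  PySem.Str.isIn "website" (pvLow c) || PySem.Str.isIn "url" (pvLow c) || PySem.Str.isIn "web" (pvLow c)
def compB (c : String) : Bool :=
  PySem.Str.isIn "company" (pvLow c) || PySem.Str.isIn "name" (pvLow c) || PySem.Str.isIn "business" (pvLow c)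

-- A's loop step, on a (index, original column) pair, with the lookup already resolved
def stepA (p : Option String × Option String) (q : Int × String) : Option String × Option String :=
  if webB q.2 && !(pvTruthy p.1) then (some q.2, p.2)
  else if compB q.2 && !(pvTruthy p.2) then (p.1, some q.2)
  else p

theorem pvTruthy_none : pvTruthy none = false := rfl

theorem pvMatches_web (c : String) : pvMatches ["website", "url", "web"] c = webB c := by
  simp [pvMatches, webB, pvLow, List.any, Bool.or_assoc]

theorem pvMatches_comp (c : String) : pvMatches ["company", "name", "business"] c = compB c := by
  simp [pvMatches, compB, pvLow, List.any, Bool.or_assoc]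

theorem truthy_of_isIn (sub x : String) (hsub : sub.toList ≠ [])
    (h : PySem.Str.isIn sub (pvLow x) = true) : pvTruthy (some x) = true := by
  simp only [pvTruthy, decide_eq_true_eq]
  by_contra hl
  have hlen := PySem.Str.len_eq x
  have hx : x.toList = [] := by
    apply List.eq_nil_of_length_eq_zero
    omega
  have hinf := (PySem.Str.isIn_iff_infix (sub := sub) (s := pvLow x)).mp h
  have hempty : (pvLow x).toList = [] := by
    simp only [pvLow, PySem.Str.toList_strip, PySem.Str.toList_lower, hx]
    decide
  rw [hempty] at hinf
  exact hsub (List.infix_nil.mp hinf)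

theorem truthy_of_webB (x : String) (h : webB x = true) : pvTruthy (some x) = true := by
  simp only [webB, Bool.or_eq_true] at h
  rcases h with (h | h) | h
  · exact truthy_of_isIn _ _ (by decide) h
  · exact truthy_of_isIn _ _ (by decide) h
  · exact truthy_of_isIn _ _ (by decide) h

theorem truthy_of_compB (x : String) (h : compB x = true) : pvTruthy (some x) = true := by
  simp only [compB, Bool.or_eq_true] at h
  rcases h with (h | h) | h
  · exact truthy_of_isIn _ _ (by decide) h
  · exact truthy_of_isIn _ _ (by decide) h
  · exact truthy_of_isIn _ _ (by decide) h

-- find? respects pointwise-equal predicates on members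
theorem find?_congr_mem {α : Type} {p q : α → Bool} :
    ∀ (l : List α), (∀ x ∈ l, p x = q x) → l.find? p = l.find? q := by
  intro l
  induction l with
  | nil => intro _; rfl
  | cons a t ih =>
    intro h
    simp only [List.find?_cons]
    rw [h a (by simp)]
    by_cases hq : q a = true
    · simp [hq]
    · simp only [Bool.not_eq_true] at hq; simp [hq, ih (fun x hx => h x (by simp [hx]))]

-- both slots truthy: the loop changes nothing
theorem foldA_both (l : List (Int × String)) (x y : String)
    (hx : pvTruthy (some x) = true) (hy : pvTruthy (some y) = true) :
    l.foldl stepA (some x, some y) = (some x, some y) := by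
  induction l with
  | nil => rfl
  | cons q t ih => simp [List.foldl_cons, stepA, hx, hy, ih]

-- website slot truthy: only the company slot is still searched
theorem foldA_web (l : List (Int × String)) (x : String) (hx : pvTruthy (some x) = true) :
    l.foldl stepA (some x, none) = (some x, (l.find? (fun q => compB q.2)).map (·.2)) := by
  induction l with
  | nil => rfl
  | cons q t ih =>
    have h1 : (webB q.2 && !(pvTruthy (some x))) = false := by simp [hx]
    simp only [List.foldl_cons, stepA, h1, Bool.false_eq_true, if_false, pvTruthy_none,
      Bool.not_false, Bool.and_true, List.find?_cons]
    by_cases hc : compB q.2 = true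
    · simp [hc, foldA_both t x q.2 hx (truthy_of_compB _ hc)]
    · simp only [Bool.not_eq_true] at hc
      simp [hc, ih]

-- company slot truthy: only the website slot is still searched
theorem foldA_comp (l : List (Int × String)) (y : String) (hy : pvTruthy (some y) = true) :
    l.foldl stepA (none, some y) = ((l.find? (fun q => webB q.2)).map (·.2), some y) := by
  induction l with
  | nil => rfl
  | cons q t ih =>
    simp only [List.foldl_cons, stepA, pvTruthy_none, Bool.not_false, Bool.and_true,
      List.find?_cons]
    by_cases hw : webB q.2 = true
    · simp [hw, foldA_both t q.2 y (truthy_of_webB _ hw) hy]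
    · simp only [Bool.not_eq_true] at hw
      have h2 : (compB q.2 && !(pvTruthy (some y))) = false := by simp [hy]
      simp [hw, h2, ih]

-- the heart: A's loop over distinct-index pairs equals B's two searches
-- (the company search skips exactly the index the website search found)
theorem foldA_main : ∀ (l : List (Int × String)), l.Pairwise (fun a b => a.1 ≠ b.1) →
    l.foldl stepA (none, none) =
      ((l.find? (fun q => webB q.2)).map (·.2),
       (l.find? (fun q =>
          (some q.1 != (l.find? (fun q' => webB q'.2)).map (·.1)) && compB q.2)).map (·.2)) := by
  intro l
  induction l with
  | nil => intro _; rfl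
  | cons q t ih =>
    intro hp
    rw [List.pairwise_cons] at hp
    obtain ⟨hq, ht⟩ := hp
    simp only [List.foldl_cons, stepA, pvTruthy_none, Bool.not_false, Bool.and_true,
      List.find?_cons]
    by_cases hw : webB q.2 = true
    · -- website found at q: the company search skips exactly q's index
      simp only [hw, if_true, Option.map_some, bne_self_eq_false, Bool.false_and]
      rw [foldA_web t q.2 (truthy_of_webB _ hw)]
      refine Prod.ext rfl ?_
      exact congrArg (Option.map (fun x => x.2))
        (find?_congr_mem (p := fun r : Int × String => compB r.2)
          (q := fun r : Int × String => (some r.1 != some q.1) && compB r.2) t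
          (fun x hx => by
            have hne : q.1 ≠ x.1 := hq x hx
            simp [Ne.symm hne]))
    · simp only [Bool.not_eq_true] at hw
      simp only [hw, Bool.false_eq_true, if_false]
      by_cases hc : compB q.2 = true
      · -- company found at q (any website index comes from the tail, hence differs from q.1)
        simp only [hc, if_true]
        rw [foldA_comp t q.2 (truthy_of_compB _ hc)]
        have hskip : (some q.1 != (t.find? (fun q' => webB q'.2)).map (fun x => x.1)) = true := by
          cases hf : t.find? (fun q' => webB q'.2) with
          | none => simp
          | some b =>
            have hne : q.1 ≠ b.1 := hq b (List.mem_of_find?_eq_some hf)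
            simp [hne]
        simp only [hskip, Bool.true_and, Option.map_some]
      · simp only [Bool.not_eq_true] at hc
        simp only [hc, Bool.and_false, Bool.false_eq_true, if_false]
        exact ih ht

-- enumerate of a mapped list
theorem enumerate_map {α β : Type} (f : α → β) :
    ∀ (xs : List α) (s : Int),
      PySem.List.enumerate (xs.map f) s = (PySem.List.enumerate xs s).map (fun p => (p.1, f p.2)) := by
  intro xs
  induction xs with
  | nil => intro s; simp [PySem.List.enumerate_nil]
  | cons a t ih => intro s; simp [PySem.List.enumerate_cons, ih]

-- an enumerate pair looks up to its own element
theorem pyGet?_of_mem_enumerate (columns : List String) (q : Int × String)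
    (hq : q ∈ PySem.List.enumerate columns 0) :
    PySem.List.pyGet? columns q.1 = some q.2 := by
  rw [PySem.List.mem_enumerate_iff] at hq
  obtain ⟨k, hk, rfl⟩ := hq
  simp [hk]

-- pvFirstIdx is find? on the pair list, projected to the index
theorem pvFirstIdx_eq_find? (keys : List String) (skip : Option Int) :
    ∀ (pairs : List (Int × String)),
      pvFirstIdx pairs keys skip
        = (pairs.find? (fun q => (some q.1 != skip) && pvMatches keys q.2)).map (·.1) := by
  intro pairs
  induction pairs with
  | nil => rfl
  | cons q t ih =>
    simp only [pvFirstIdx, List.find?_cons]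
    by_cases h : ((some q.1 != skip) && pvMatches keys q.2) = true
    · simp [h]
    · simp only [Bool.not_eq_true] at h
      simp [h, ih]

-- 'columns[found index]' is the found pair's element
theorem bind_get_eq_map_snd (columns : List String) (p : (Int × String) → Bool) :
    (((PySem.List.enumerate columns 0).find? p).map (·.1)).bind
        (fun i => PySem.List.pyGet? columns i)
      = ((PySem.List.enumerate columns 0).find? p).map (·.2) := by
  cases hf : (PySem.List.enumerate columns 0).find? p with
  | none => rfl
  | some q => simp [pyGet?_of_mem_enumerate columns q (List.mem_of_find?_eq_some hf)]

-- ===== VERDICT (by name: the statement is the Claim_ definition above) =====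
theorem find_required_columns_case_b_py_spec : Claim_equal_find_required_columns_case_b_py := by
  intro columns _
  unfold Spec_find_required_columns_case_b_py
  simp only [find_required_columns_case_b_py, find_required_columns_case_b_py_alt,
    enumerate_map, List.foldl_map]
  -- A's fold, with each 'columns[i]' resolved to the pair's own element
  have hfold :
      List.foldl
        (fun (x : Option String × Option String) (y : Int × String) =>
          if ((PySem.Str.isIn "website" (pvLow y.2) || PySem.Str.isIn "url" (pvLow y.2) ||
                PySem.Str.isIn "web" (pvLow y.2)) && !pvTruthy x.1) = true then
            (PySem.List.pyGet? columns y.1, x.2)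
          else
            if ((PySem.Str.isIn "company" (pvLow y.2) || PySem.Str.isIn "name" (pvLow y.2) ||
                  PySem.Str.isIn "business" (pvLow y.2)) && !pvTruthy x.2) = true then
              (x.1, PySem.List.pyGet? columns y.1)
            else x)
        (none, none) (PySem.List.enumerate columns)
      = List.foldl stepA (none, none) (PySem.List.enumerate columns) :=
    PySem.List.foldl_congr_mem _ _ _ _ (fun acc q hq => by
      simp only [stepA, webB, compB, pyGet?_of_mem_enumerate columns q hq]
      rfl)
  -- B's searches, with the trivial 'i != None' test dropped and keyword lists folded
  have hW : (PySem.List.enumerate columns).find?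
        (fun q => (some q.1 != (none : Option Int)) && pvMatches ["website", "url", "web"] q.2)
      = (PySem.List.enumerate columns).find? (fun q => webB q.2) :=
    find?_congr_mem _ (fun x _ => by simp [pvMatches_web])
  have hC : (PySem.List.enumerate columns).find?
        (fun q => (some q.1 !=
            ((PySem.List.enumerate columns).find? (fun q' => webB q'.2)).map (·.1)) &&
          pvMatches ["company", "name", "business"] q.2)
      = (PySem.List.enumerate columns).find?
        (fun q => (some q.1 !=
            ((PySem.List.enumerate columns).find? (fun q' => webB q'.2)).map (·.1)) &&
          compB q.2) :=
    find?_congr_mem _ (fun x _ => by simp [pvMatches_comp])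
  rw [hfold,
    foldA_main _ ((PySem.List.pairwise_lt_enumerate columns 0).imp (fun h => ne_of_lt h)),
    pvFirstIdx_eq_find?, pvFirstIdx_eq_find?, hW, hC,
    bind_get_eq_map_snd, bind_get_eq_map_snd]
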